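-- pv_equiv track=rewrite | github.com/mole99/interconnect-tests | verify.py | extract_bit
-- ===== SOURCE A (Python) =====
-- def extract_bit(data, port_bit):
--     new_data = []
--     for (time, value) in data:
--         # Try to access the bit directly
--         try:
--             bit = value[-port_bit-1]
--             if bit != 'b':
--                 new_data.append((time, bit))
--                 continue
--         except:
--             pass
--
--         # Else get the highest bit
--         bit = value[1]
--
--         # If 1 or 0, set to 0
--         if bit == '1' or bit == '0':
--             bit = '0'
--
--         new_data.append((time, bit))
--
--     data = new_data
--
--     # Remove value pairs with no changes
--     new_data = []
--
--     cur_val = None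
--     for (time, value) in data:
--         if cur_val == None:
--             cur_val = value
--             new_data.append((time, value))
--         else:
--             if cur_val != value:
--                 new_data.append((time, value))
--                 cur_val = value
--
--     return new_data
-- ===== SOURCE B (Python) =====
-- def extract_bit(data, port_bit):
--     # One fused pass: extract the bit and drop consecutive duplicates without
--     # building the intermediate list A builds.
--     new_data = []
--     cur_val = None
--     for (time, value) in data:
--         try:
--             bit = value[-port_bit-1]
--         except:
--             bit = None
--         if bit is None or bit == 'b':
--             bit = value[1]
--             if bit == '1' or bit == '0':
--                 bit = '0'
--         if cur_val is None or bit != cur_val: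
--             new_data.append((time, bit))
--             cur_val = bit
--     return new_data
-- ===== Notes on version B (the rewrite author's own statement) =====
-- stated objective: alternative
-- what changed: B fuses A's two passes (per-element bit extraction, then consecutive-duplicate removal) into a single loop carrying the last emitted bit, with no intermediate list.
import Mathlib
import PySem

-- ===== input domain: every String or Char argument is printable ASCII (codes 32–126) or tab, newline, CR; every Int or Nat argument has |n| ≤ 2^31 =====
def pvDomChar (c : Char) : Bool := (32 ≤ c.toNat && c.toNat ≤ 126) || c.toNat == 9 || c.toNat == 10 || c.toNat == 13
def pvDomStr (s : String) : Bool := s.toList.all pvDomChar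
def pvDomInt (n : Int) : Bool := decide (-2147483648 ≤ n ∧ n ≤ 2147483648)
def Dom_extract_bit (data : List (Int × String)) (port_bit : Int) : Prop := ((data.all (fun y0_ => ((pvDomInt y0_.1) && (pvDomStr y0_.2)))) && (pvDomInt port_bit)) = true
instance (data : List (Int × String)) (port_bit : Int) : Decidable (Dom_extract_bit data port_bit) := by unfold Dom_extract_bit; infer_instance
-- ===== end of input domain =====

-- B fuses A's two passes (transform, then consecutive-dedup) into one loop with no
-- intermediate list (objective: simpler/alternative; equal return values on Pre_).

-- ===== PORT A =====
-- value[1] fallback with the '1'/'0' collapse; "" marks the IndexError case, excluded by Pre_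
def pvFallbackA (v : String) : String :=
  match PySem.Str.pyGet? v 1 with
  | some c => if c = '1' || c = '0' then String.ofList ['0'] else String.ofList [c]
  | none => ""  -- Python raises IndexError here (outside Pre_)

-- first loop: try value[-port_bit-1]; if it fails or is 'b', use the fallback
def pvPass1 (data : List (Int × String)) (port_bit : Int) : List (Int × String) :=
  data.foldl (fun acc p =>
    match PySem.Str.pyGet? p.2 (-port_bit - 1) with
    | some c => if c ≠ 'b' then acc ++ [(p.1, String.ofList [c])] else acc ++ [(p.1, pvFallbackA p.2)]
    | none => acc ++ [(p.1, pvFallbackA p.2)]) []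

-- second loop: remove value pairs with no changes (cur_val = None initially)
def pvPass2 (data : List (Int × String)) : List (Int × String) :=
  (data.foldl (fun (st : Option String × List (Int × String)) p =>
     match st.1 with
     | none => (some p.2, st.2 ++ [p])
     | some c => if c ≠ p.2 then (some p.2, st.2 ++ [p]) else st)
    (none, [])).2

def extract_bit (data : List (Int × String)) (port_bit : Int) : List (Int × String) :=
  pvPass2 (pvPass1 data port_bit)

-- ===== PORT B =====
-- B's fallback: value[1], collapsing '1'/'0' to '0'; ' ' marks the IndexError case (outside Pre_)
def pvFbB (v : String) : Char :=
  match PySem.Str.pyGet? v 1 with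
  | some c => if c = '1' || c = '0' then '0' else c
  | none => ' '

-- B's bit for one value: try value[-port_bit-1]; on failure or 'b' use the fallback
def pvBitB (v : String) (port_bit : Int) : Char :=
  match PySem.Str.pyGet? v (-port_bit - 1) with
  | some c => if c = 'b' then pvFbB v else c
  | none => pvFbB v

-- single fused loop: extract the bit and append only when it changes
def extract_bit_alt (data : List (Int × String)) (port_bit : Int) : List (Int × String) :=
  (data.foldl (fun (st : Option Char × List (Int × String)) p =>
     let b := pvBitB p.2 port_bit
     match st.1 with
     | none => (some b, st.2 ++ [(p.1, String.ofList [b])])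
     | some c => if b ≠ c then (some b, st.2 ++ [(p.1, String.ofList [b])]) else st)
    (none, [])).2

-- ===== PRECONDITION & SPEC =====
-- Pre_ excludes exactly the inputs where Python A raises IndexError: a pair whose
-- direct index fails or hits 'b' while value has no index 1 for the fallback.
def Pre_extract_bit (data : List (Int × String)) (port_bit : Int) : Prop :=
  ∀ p ∈ data,
    (PySem.Str.pyGet? p.2 (-port_bit - 1) = none ∨ PySem.Str.pyGet? p.2 (-port_bit - 1) = some 'b') →
    (PySem.Str.pyGet? p.2 1).isSome = true
instance (data : List (Int × String)) (port_bit : Int) : Decidable (Pre_extract_bit data port_bit) := by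
  unfold Pre_extract_bit; infer_instance

def pvWitness_extract_bit : (List (Int × String)) × Int :=
  ([(0, "b101"), (5, "b001"), (9, "b011")], 2)

def Spec_extract_bit (data : List (Int × String)) (port_bit : Int) (out : List (Int × String)) : Prop := out = extract_bit_alt data port_bit
instance (data : List (Int × String)) (port_bit : Int) (out : List (Int × String)) : Decidable (Spec_extract_bit data port_bit out) := by unfold Spec_extract_bit; infer_instance

-- ===== CLAIM (what is proved, stated in full; the proofs are below) =====
def Claim_equal_extract_bit : Prop := ∀ (data : List (Int × String)) (port_bit : Int), Dom_extract_bit data port_bit → Pre_extract_bit data port_bit → Spec_extract_bit data port_bit (extract_bit data port_bit)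

-- ===== LEMMAS AND PROOFS =====

-- the pair A's first loop appends for one element
def pvG (port_bit : Int) (p : Int × String) : Int × String :=
  (p.1, match PySem.Str.pyGet? p.2 (-port_bit - 1) with
        | some c => if c ≠ 'b' then String.ofList [c] else pvFallbackA p.2
        | none => pvFallbackA p.2)

lemma pvPass1_eq_map (data : List (Int × String)) (port_bit : Int) :
    pvPass1 data port_bit = data.map (pvG port_bit) := by
  have h : (fun (acc : List (Int × String)) (p : Int × String) =>
      match PySem.Str.pyGet? p.2 (-port_bit - 1) with
      | some c => if c ≠ 'b' then acc ++ [(p.1, String.ofList [c])] else acc ++ [(p.1, pvFallbackA p.2)]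
      | none => acc ++ [(p.1, pvFallbackA p.2)])
      = (fun acc p => acc ++ [pvG port_bit p]) := by
    funext acc p
    simp only [pvG]
    cases PySem.Str.pyGet? p.2 (-port_bit - 1) with
    | none => rfl
    | some c => by_cases hc : c = 'b' <;> simp [hc]
  unfold pvPass1
  rw [h, PySem.List.foldl_append_singleton_eq_map]
  simp

-- under the precondition, A's appended string is B's bit made into a string
lemma pvG_snd (port_bit : Int) (p : Int × String)
    (hp : (PySem.Str.pyGet? p.2 (-port_bit - 1) = none ∨ PySem.Str.pyGet? p.2 (-port_bit - 1) = some 'b') →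
          (PySem.Str.pyGet? p.2 1).isSome = true) :
    (pvG port_bit p).2 = String.ofList [pvBitB p.2 port_bit] := by
  unfold pvG pvBitB
  cases hg : PySem.Str.pyGet? p.2 (-port_bit - 1) with
  | none =>
      have h1 := hp (Or.inl hg)
      cases h2 : PySem.Str.pyGet? p.2 1 with
      | none => rw [h2] at h1; simp at h1
      | some c => simp only [pvFallbackA, pvFbB, h2]; split <;> rfl
  | some c =>
      by_cases hc : c = 'b'
      · subst hc
        have h1 := hp (Or.inr hg)
        cases h2 : PySem.Str.pyGet? p.2 1 with
        | none => rw [h2] at h1; simp at h1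
        | some d =>
            simp only [pvFallbackA, pvFbB, h2, ne_eq, not_true_eq_false, if_false, if_true]
            split <;> rfl
      · simp [hc]

lemma pvFuse (port_bit : Int) (data : List (Int × String))
    (hp : ∀ p ∈ data,
      (PySem.Str.pyGet? p.2 (-port_bit - 1) = none ∨ PySem.Str.pyGet? p.2 (-port_bit - 1) = some 'b') →
      (PySem.Str.pyGet? p.2 1).isSome = true) :
    ∀ (cur : Option Char) (acc : List (Int × String)),
    ((data.map (pvG port_bit)).foldl (fun (st : Option String × List (Int × String)) p =>
        match st.1 with
        | none => (some p.2, st.2 ++ [p])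
        | some c => if c ≠ p.2 then (some p.2, st.2 ++ [p]) else st)
      (cur.map (fun c => String.ofList [c]), acc)).2
    = (data.foldl (fun (st : Option Char × List (Int × String)) p =>
        let b := pvBitB p.2 port_bit
        match st.1 with
        | none => (some b, st.2 ++ [(p.1, String.ofList [b])])
        | some c => if b ≠ c then (some b, st.2 ++ [(p.1, String.ofList [b])]) else st)
      (cur, acc)).2 := by
  induction data with
  | nil => intro cur acc; rfl
  | cons p data ih =>
      intro cur acc
      have hpp := hp p (List.mem_cons_self ..)
      have hrest : ∀ q ∈ data,
          (PySem.Str.pyGet? q.2 (-port_bit - 1) = none ∨ PySem.Str.pyGet? q.2 (-port_bit - 1) = some 'b') →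
          (PySem.Str.pyGet? q.2 1).isSome = true := fun q hq => hp q (List.mem_cons_of_mem _ hq)
      simp only [List.map_cons, List.foldl_cons]
      have hsnd := pvG_snd port_bit p hpp
      cases cur with
      | none =>
          have := ih hrest (some (pvBitB p.2 port_bit)) (acc ++ [(p.1, String.ofList [pvBitB p.2 port_bit])])
          simp only [Option.map_none] at *
          rw [show (pvG port_bit p) = (p.1, String.ofList [pvBitB p.2 port_bit]) from Prod.ext rfl hsnd]
          exact this
      | some c =>
          rw [show (pvG port_bit p) = (p.1, String.ofList [pvBitB p.2 port_bit]) from Prod.ext rfl hsnd]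
          simp only [Option.map_some]
          by_cases hbc : pvBitB p.2 port_bit = c
          · simp only [ne_eq, hbc, not_true_eq_false, if_false]
            simpa using ih hrest (some c) acc
          · have hs : String.ofList [c] ≠ String.ofList [pvBitB p.2 port_bit] := by
              intro h
              have h2 := congrArg String.toList h
              simp at h2
              exact hbc h2.symm
            simp only [if_pos hs, ne_eq, hbc, not_false_eq_true, if_pos]
            simpa using ih hrest (some (pvBitB p.2 port_bit)) (acc ++ [(p.1, String.ofList [pvBitB p.2 port_bit])])

-- ===== VERDICT (by name: the statement is the Claim_ definition above) =====
theorem extract_bit_spec : Claim_equal_extract_bit := by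
  intro data port_bit _ hpre
  unfold Spec_extract_bit extract_bit extract_bit_alt pvPass2
  rw [pvPass1_eq_map]
  simpa using pvFuse port_bit data hpre none []
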